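-- pv_equiv track=rewrite | github.com/MightyCode/GDMC2022 | utils/book.py | createTextOfPresentationVillage
-- ===== SOURCE A (Python) =====
-- def createTextOfPresentationVillage(villageName, structuresNumber, structuresNames, deadVillagersNumber, listOfVillagers):
--     textVillagePresentationBook = (
--             '\\\\s--------------\\\\n'
--             '                      \\\\n'
--             '                      \\\\n'
--             '   Welcome to      \\\\n'
--            f' {villageName} \\\\n'
--             '                      \\\\n'
--             '                      \\\\n'
--             '                      \\\\n'
--             '                      \\\\n'
--             '                      \\\\n'
--             '                      \\\\n'
--             '                      \\\\n'
--             '--------------')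
--     textVillagePresentationBook += ('\f\\\\s---------------\\\\n')
--
--     numberOfHouse = 0
--     for i in range(len(structuresNames)):
--         if "house" in structuresNames[i]["name"]:
--             numberOfHouse += 1
--     textVillagePresentationBook += (f'{len(listOfVillagers)} villagers arrived in '
--                                     f'{numberOfHouse} houses \\\\n')
--     textVillagePresentationBook += (f'{deadVillagersNumber} villagers have died since their arrival. \\\\n')
--     textVillagePresentationBook += (''
--                       'There are '
--                       f'{structuresNumber} structures. \\\\n')
--     textVillagePresentationBook += ('---------------\\\\n\f')
--
--     for i in range(len(structuresNames)):
--         if i <= 2: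
--             if "lumberjachut" in structuresNames[i]["name"]:
--                 textVillagePresentationBook += ('Villagers built a '
--                                                 f'{structuresNames[i]["name"]} \\\\n')
--             elif "quarry" in structuresNames[i]["name"] or "well" in structuresNames[i]["name"] or "basichouse" in structuresNames[i]["name"]:
--                 textVillagePresentationBook += ('Using the lumberjack hut, villagers built a '
--                                                 f'{structuresNames[i]["name"]} \\\\n')
--             elif "smeltery" in structuresNames[i]["name"] or "furnace" in structuresNames[i]["name"] or "stonecutter" in structuresNames[i]["name"]:
--                 textVillagePresentationBook += ('Using the quarry, villagers built a '
--                                                 f'{structuresNames[i]["name"]} \\\\n')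
--             elif "workshop" in structuresNames[i]["name"] or "jail" in structuresNames[i]["name"] or "townhall" in structuresNames[i]["name"] or "farm" in structuresNames[i]["name"] or "mediumhouse" in structuresNames[i]["name"]:
--                 textVillagePresentationBook += ('Using the stone cutter, villagers built a '
--                                                 f'{structuresNames[i]["name"]} \\\\n')
--             elif "graveyard" in structuresNames[i]["name"]:
--                 textVillagePresentationBook += ('Using the furnace, villagers built a '
--                                                 f'{structuresNames[i]["name"]} \\\\n')
--             elif "basicwindmill" in structuresNames[i]["name"] or "barrack" in structuresNames[i]["name"] or "weaverhouse" in structuresNames[i]["name"] or "observatory" in structuresNames[i]["name"]: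
--                 textVillagePresentationBook += ('Using the workshop, villagers built a '
--                                                 f'{structuresNames[i]["name"]} \\\\n')
--             elif "mediumwindmill" in structuresNames[i]["name"]:
--                 textVillagePresentationBook += ('Using the windmill and the weaver house, villagers built a '
--                                                 f'{structuresNames[i]["name"]} \\\\n')
--             elif "tavern" in structuresNames[i]["name"]:
--                 textVillagePresentationBook += ('Using the windmill, the farm and the furnace, villagers built a '
--                                                 f'{structuresNames[i]["name"]} \\\\n')
--             elif "adventurerhouse" in structuresNames[i]["name"]:
--                 textVillagePresentationBook += ('Using the tavern, villagers built an '
--                                                 f'{structuresNames[i]["name"]} \\\\n')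
--         if i % 3 == 0 and i != 0:
--             textVillagePresentationBook += ('\f')
--         if i >= 3:
--             if "lumberjachut" in structuresNames[i]["name"]:
--                 textVillagePresentationBook += ('Villagers built a '
--                                                 f'{structuresNames[i]["name"]} \\\\n')
--             elif "quarry" in structuresNames[i]["name"] or "well" in structuresNames[i]["name"] or "basichouse" in structuresNames[i]["name"]:
--                 textVillagePresentationBook += ('Using the lumberjack hut, villagers built a '
--                                                 f'{structuresNames[i]["name"]} \\\\n')
--             elif "smeltery" in structuresNames[i]["name"] or "furnace" in structuresNames[i]["name"] or "stonecutter" in structuresNames[i]["name"]: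
--                 textVillagePresentationBook += ('Using the quarry, villagers built a '
--                                                 f'{structuresNames[i]["name"]} \\\\n')
--             elif "workshop" in structuresNames[i]["name"] or "jail" in structuresNames[i]["name"] or "townhall" in structuresNames[i]["name"] or "farm" in structuresNames[i]["name"] or "mediumhouse" in structuresNames[i]["name"]:
--                 textVillagePresentationBook += ('Using the stone cutter, villagers built a '
--                                                 f'{structuresNames[i]["name"]} \\\\n')
--             elif "graveyard" in structuresNames[i]["name"]:
--                 textVillagePresentationBook += ('Using the furnace, villagers built a '
--                                                 f'{structuresNames[i]["name"]} \\\\n')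
--             elif "basicwindmill" in structuresNames[i]["name"] or "barrack" in structuresNames[i]["name"] or "weaverhouse" in structuresNames[i]["name"] or "observatory" in structuresNames[i]["name"]:
--                 textVillagePresentationBook += ('Using the workshop, villagers built a '
--                                                 f'{structuresNames[i]["name"]} \\\\n')
--             elif "mediumwindmill" in structuresNames[i]["name"]:
--                 textVillagePresentationBook += ('Using the windmill and the weaver house, villagers built a '
--                                                 f'{structuresNames[i]["name"]} \\\\n')
--             elif "tavern" in structuresNames[i]["name"]:
--                 textVillagePresentationBook += ('Using the windmill, the farm and the furnace, villagers built a '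
--                                                 f'{structuresNames[i]["name"]} \\\\n')
--             elif "adventurerhouse" in structuresNames[i]["name"]:
--                 textVillagePresentationBook += ('Using the tavern, villagers built an '
--                                                 f'{structuresNames[i]["name"]} \\\\n')
--     return textVillagePresentationBook
-- ===== SOURCE B (Python) =====
-- _TABLE = [
--     (["lumberjachut"], 'Villagers built a '),
--     (["quarry", "well", "basichouse"], 'Using the lumberjack hut, villagers built a '),
--     (["smeltery", "furnace", "stonecutter"], 'Using the quarry, villagers built a '),
--     (["workshop", "jail", "townhall", "farm", "mediumhouse"], 'Using the stone cutter, villagers built a '),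
--     (["graveyard"], 'Using the furnace, villagers built a '),
--     (["basicwindmill", "barrack", "weaverhouse", "observatory"], 'Using the workshop, villagers built a '),
--     (["mediumwindmill"], 'Using the windmill and the weaver house, villagers built a '),
--     (["tavern"], 'Using the windmill, the farm and the furnace, villagers built a '),
--     (["adventurerhouse"], 'Using the tavern, villagers built an '),
-- ]
--
--
-- def _message(name):
--     for kws, p in _TABLE:
--         if any(k in name for k in kws):
--             return p + name + ' \\\\n'
--     return ''
--
--
-- def _pagesText(msgs):
--     # recursively group messages into pages of three, separated by form feeds
--     if len(msgs) == 0: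
--         return ''
--     if len(msgs) == 1:
--         return msgs[0]
--     if len(msgs) == 2:
--         return msgs[0] + msgs[1]
--     if len(msgs) == 3:
--         return msgs[0] + msgs[1] + msgs[2]
--     return msgs[0] + msgs[1] + msgs[2] + '\f' + _pagesText(msgs[3:])
--
--
-- def createTextOfPresentationVillage(villageName, structuresNumber, structuresNames, deadVillagersNumber, listOfVillagers):
--     msgs = [_message(s["name"]) for s in structuresNames]
--     numberOfHouse = len([s for s in structuresNames if "house" in s["name"]])
--     header = (
--             '\\\\s--------------\\\\n'
--             '                      \\\\n'
--             '                      \\\\n'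
--             '   Welcome to      \\\\n'
--            f' {villageName} \\\\n'
--             '                      \\\\n'
--             '                      \\\\n'
--             '                      \\\\n'
--             '                      \\\\n'
--             '                      \\\\n'
--             '                      \\\\n'
--             '                      \\\\n'
--             '--------------'
--             '\f\\\\s---------------\\\\n'
--             f'{len(listOfVillagers)} villagers arrived in {numberOfHouse} houses \\\\n'
--             f'{deadVillagersNumber} villagers have died since their arrival. \\\\n'
--             f'There are {structuresNumber} structures. \\\\n'
--             '---------------\\\\n\f')
--     return header + _pagesText(msgs)
-- ===== Notes on version B (the rewrite author's own statement) =====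
-- stated objective: simpler
-- what changed: B is a staged pipeline instead of A's single indexed loop with duplicated elif blocks: it first maps every structure to its message string via a first-match scan of an ordered keyword table, then recursively paginates the message list three messages per page with '\f' separators (no index arithmetic or page-break conditionals), and gets the house count as the length of a filtered list.
-- outside the precondition, e.g. on createTextOfPresentationVillage('V', 1, [{}], 0, []): A raises KeyError, B raises KeyError
import Mathlib
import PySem

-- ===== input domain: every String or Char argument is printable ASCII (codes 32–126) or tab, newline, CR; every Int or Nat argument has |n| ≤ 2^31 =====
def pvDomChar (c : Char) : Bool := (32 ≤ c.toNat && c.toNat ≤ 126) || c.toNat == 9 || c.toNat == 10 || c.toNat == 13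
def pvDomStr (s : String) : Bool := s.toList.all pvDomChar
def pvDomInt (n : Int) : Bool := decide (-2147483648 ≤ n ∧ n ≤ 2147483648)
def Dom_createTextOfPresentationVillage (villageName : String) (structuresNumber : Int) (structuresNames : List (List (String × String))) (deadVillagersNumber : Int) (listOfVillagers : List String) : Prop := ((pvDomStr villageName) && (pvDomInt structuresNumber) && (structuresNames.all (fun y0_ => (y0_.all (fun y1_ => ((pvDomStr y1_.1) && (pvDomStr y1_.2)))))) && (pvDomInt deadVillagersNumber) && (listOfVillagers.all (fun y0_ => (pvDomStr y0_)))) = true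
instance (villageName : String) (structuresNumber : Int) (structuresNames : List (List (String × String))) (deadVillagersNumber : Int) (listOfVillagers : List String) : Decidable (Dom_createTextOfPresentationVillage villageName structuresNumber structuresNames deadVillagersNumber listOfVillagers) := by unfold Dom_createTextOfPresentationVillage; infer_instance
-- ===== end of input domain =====

-- B restructures A's single indexed loop (two duplicated elif blocks + per-index page-break
-- conditionals) into a staged pipeline: map each structure to its message, then recursively
-- paginate the message list three per page with '\f' separators (objective: simpler).
-- ===== PORT A =====
-- A-side helper: the elif chain A writes out twice, verbatim (Python appends nothing when no keyword matches = "").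
def pvChainA (name : String) : String :=
  if PySem.Str.isIn "lumberjachut" name then "Villagers built a " ++ name ++ " \\\\n"
  else if PySem.Str.isIn "quarry" name || PySem.Str.isIn "well" name || PySem.Str.isIn "basichouse" name then
    "Using the lumberjack hut, villagers built a " ++ name ++ " \\\\n"
  else if PySem.Str.isIn "smeltery" name || PySem.Str.isIn "furnace" name || PySem.Str.isIn "stonecutter" name then
    "Using the quarry, villagers built a " ++ name ++ " \\\\n"
  else if PySem.Str.isIn "workshop" name || PySem.Str.isIn "jail" name || PySem.Str.isIn "townhall" name || PySem.Str.isIn "farm" name || PySem.Str.isIn "mediumhouse" name then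
    "Using the stone cutter, villagers built a " ++ name ++ " \\\\n"
  else if PySem.Str.isIn "graveyard" name then "Using the furnace, villagers built a " ++ name ++ " \\\\n"
  else if PySem.Str.isIn "basicwindmill" name || PySem.Str.isIn "barrack" name || PySem.Str.isIn "weaverhouse" name || PySem.Str.isIn "observatory" name then
    "Using the workshop, villagers built a " ++ name ++ " \\\\n"
  else if PySem.Str.isIn "mediumwindmill" name then "Using the windmill and the weaver house, villagers built a " ++ name ++ " \\\\n"
  else if PySem.Str.isIn "tavern" name then "Using the windmill, the farm and the furnace, villagers built a " ++ name ++ " \\\\n"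
  else if PySem.Str.isIn "adventurerhouse" name then "Using the tavern, villagers built an " ++ name ++ " \\\\n"
  else ""

def createTextOfPresentationVillage (villageName : String) (structuresNumber : Int) (structuresNames : List (List (String × String))) (deadVillagersNumber : Int) (listOfVillagers : List String) : String :=
  (PySem.List.pyRange 0 (PySem.List.len structuresNames)).foldl
    (fun text i =>
      let name := PySem.Dict.getD (PySem.Dict.mk (PySem.List.pyGetD structuresNames i [])) "name" ""
      let text := if i ≤ 2 then text ++ pvChainA name else text
      let text := if PySem.Int.mod i 3 == 0 && !(i == 0) then text ++ "\x0C" else text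
      if 3 ≤ i then text ++ pvChainA name else text)
    ("\\\\s--------------\\\\n" ++ "                      \\\\n" ++ "                      \\\\n" ++
     "   Welcome to      \\\\n" ++ " " ++ villageName ++ " \\\\n" ++
     "                      \\\\n" ++ "                      \\\\n" ++ "                      \\\\n" ++
     "                      \\\\n" ++ "                      \\\\n" ++ "                      \\\\n" ++
     "                      \\\\n" ++ "--------------" ++
     "\x0C\\\\s---------------\\\\n" ++
     PySem.Int.toStr (PySem.List.len listOfVillagers) ++ " villagers arrived in " ++
     PySem.Int.toStr ((PySem.List.pyRange 0 (PySem.List.len structuresNames)).foldl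
       (fun n i => if PySem.Str.isIn "house" (PySem.Dict.getD (PySem.Dict.mk (PySem.List.pyGetD structuresNames i [])) "name" "") then n + 1 else n) (0 : Int)) ++
     " houses \\\\n" ++
     PySem.Int.toStr deadVillagersNumber ++ " villagers have died since their arrival. \\\\n" ++
     "There are " ++ PySem.Int.toStr structuresNumber ++ " structures. \\\\n" ++
     "---------------\\\\n\x0C")

-- ===== PORT B =====
-- B-side helpers: ordered keyword table; _message = first-match scan (Python's next(...) = findSome?);
-- _pagesText = recursive pagination, three messages per page, pages separated by '\f'.
def pvTable : List (List String × String) :=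
  [(["lumberjachut"], "Villagers built a "),
   (["quarry", "well", "basichouse"], "Using the lumberjack hut, villagers built a "),
   (["smeltery", "furnace", "stonecutter"], "Using the quarry, villagers built a "),
   (["workshop", "jail", "townhall", "farm", "mediumhouse"], "Using the stone cutter, villagers built a "),
   (["graveyard"], "Using the furnace, villagers built a "),
   (["basicwindmill", "barrack", "weaverhouse", "observatory"], "Using the workshop, villagers built a "),
   (["mediumwindmill"], "Using the windmill and the weaver house, villagers built a "),
   (["tavern"], "Using the windmill, the farm and the furnace, villagers built a "),
   (["adventurerhouse"], "Using the tavern, villagers built an ")]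

def pvMessage : List (List String × String) → String → String
  | [], _ => ""
  | (kws, pre) :: rest, name =>
    if kws.any (fun k => PySem.Str.isIn k name) then pre ++ name ++ " \\\\n"
    else pvMessage rest name

def pvPagesText : List String → String
  | [] => ""
  | [a] => a
  | [a, b] => a ++ b
  | [a, b, c] => a ++ b ++ c
  | a :: b :: c :: d :: rest => a ++ b ++ c ++ "\x0C" ++ pvPagesText (d :: rest)

def createTextOfPresentationVillage_alt (villageName : String) (structuresNumber : Int) (structuresNames : List (List (String × String))) (deadVillagersNumber : Int) (listOfVillagers : List String) : String :=
  let msgs := structuresNames.map (fun s => pvMessage pvTable (PySem.Dict.getD (PySem.Dict.mk s) "name" ""))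
  let numberOfHouse := PySem.List.len (structuresNames.filter (fun s => PySem.Str.isIn "house" (PySem.Dict.getD (PySem.Dict.mk s) "name" "")))
  ("\\\\s--------------\\\\n" ++ "                      \\\\n" ++ "                      \\\\n" ++
   "   Welcome to      \\\\n" ++ " " ++ villageName ++ " \\\\n" ++
   "                      \\\\n" ++ "                      \\\\n" ++ "                      \\\\n" ++
   "                      \\\\n" ++ "                      \\\\n" ++ "                      \\\\n" ++
   "                      \\\\n" ++ "--------------" ++
   "\x0C\\\\s---------------\\\\n" ++
   PySem.Int.toStr (PySem.List.len listOfVillagers) ++ " villagers arrived in " ++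
   PySem.Int.toStr numberOfHouse ++
   " houses \\\\n" ++
   PySem.Int.toStr deadVillagersNumber ++ " villagers have died since their arrival. \\\\n" ++
   "There are " ++ PySem.Int.toStr structuresNumber ++ " structures. \\\\n" ++
   "---------------\\\\n\x0C") ++ pvPagesText msgs

-- ===== PRECONDITION & SPEC =====
-- Pre_ excludes exactly the inputs on which Python A raises KeyError: some dict in structuresNames has no "name" key.
def Pre_createTextOfPresentationVillage (villageName : String) (structuresNumber : Int) (structuresNames : List (List (String × String))) (deadVillagersNumber : Int) (listOfVillagers : List String) : Prop :=
  (structuresNames.all (fun s => (PySem.Dict.mk s).contains "name")) = true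
instance (villageName : String) (structuresNumber : Int) (structuresNames : List (List (String × String))) (deadVillagersNumber : Int) (listOfVillagers : List String) : Decidable (Pre_createTextOfPresentationVillage villageName structuresNumber structuresNames deadVillagersNumber listOfVillagers) := by unfold Pre_createTextOfPresentationVillage; infer_instance
def pvWitness_createTextOfPresentationVillage : String × Int × (List (List (String × String))) × Int × List String :=
  ("Oakvale", 4, [[("name", "quarry")], [("name", "adventurerhouse")], [("name", "well")], [("name", "tavern")]], 1, ["anna", "bob"])

def Spec_createTextOfPresentationVillage (villageName : String) (structuresNumber : Int) (structuresNames : List (List (String × String))) (deadVillagersNumber : Int) (listOfVillagers : List String) (out : String) : Prop := out = createTextOfPresentationVillage_alt villageName structuresNumber structuresNames deadVillagersNumber listOfVillagers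
instance (villageName : String) (structuresNumber : Int) (structuresNames : List (List (String × String))) (deadVillagersNumber : Int) (listOfVillagers : List String) (out : String) : Decidable (Spec_createTextOfPresentationVillage villageName structuresNumber structuresNames deadVillagersNumber listOfVillagers out) := by unfold Spec_createTextOfPresentationVillage; infer_instance

-- ===== CLAIM (what is proved, stated in full; the proofs are below) =====
def Claim_equal_createTextOfPresentationVillage : Prop := ∀ (villageName : String) (structuresNumber : Int) (structuresNames : List (List (String × String))) (deadVillagersNumber : Int) (listOfVillagers : List String), Dom_createTextOfPresentationVillage villageName structuresNumber structuresNames deadVillagersNumber listOfVillagers → Pre_createTextOfPresentationVillage villageName structuresNumber structuresNames deadVillagersNumber listOfVillagers → Spec_createTextOfPresentationVillage villageName structuresNumber structuresNames deadVillagersNumber listOfVillagers (createTextOfPresentationVillage villageName structuresNumber structuresNames deadVillagersNumber listOfVillagers)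

-- ===== LEMMAS AND PROOFS =====

theorem pvWitness_ok : Pre_createTextOfPresentationVillage (pvWitness_createTextOfPresentationVillage.1) (pvWitness_createTextOfPresentationVillage.2.1) (pvWitness_createTextOfPresentationVillage.2.2.1) (pvWitness_createTextOfPresentationVillage.2.2.2.1) (pvWitness_createTextOfPresentationVillage.2.2.2.2) := by decide

-- A's elif chain and B's first-match table scan agree on every name.
theorem pvChain_eq_message (name : String) : pvChainA name = pvMessage pvTable name := by
  simp only [pvChainA, pvTable, pvMessage, List.any_cons, List.any_nil, Bool.or_assoc,
    Bool.or_false, Bool.or_eq_true]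

-- A's counting loop equals the length of B's filtered list.
theorem pvCount_eq (structuresNames : List (List (String × String))) :
    (PySem.List.pyRange 0 (PySem.List.len structuresNames)).foldl
      (fun n i => if PySem.Str.isIn "house" (PySem.Dict.getD (PySem.Dict.mk (PySem.List.pyGetD structuresNames i [])) "name" "") then n + 1 else n) (0 : Int)
    = PySem.List.len (structuresNames.filter (fun s => PySem.Str.isIn "house" (PySem.Dict.getD (PySem.Dict.mk s) "name" ""))) := by
  rw [PySem.List.foldl_pyRange_zero_pyGetD structuresNames []
        (fun n s => if PySem.Str.isIn "house" (PySem.Dict.getD (PySem.Dict.mk s) "name" "") then n + 1 else n) 0,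
      PySem.List.foldl_count_if]
  simp [List.countP_eq_length_filter]

-- The body of A's loop as a function of the (index, element) pair delivered by enumerate.
def pvStepP (t : String) (p : Int × List (String × String)) : String :=
  let name := PySem.Dict.getD (PySem.Dict.mk p.2) "name" ""
  let t := if p.1 ≤ 2 then t ++ pvChainA name else t
  let t := if PySem.Int.mod p.1 3 == 0 && !(p.1 == 0) then t ++ "\x0C" else t
  if 3 ≤ p.1 then t ++ pvChainA name else t

def pvMsgOf (x : List (String × String)) : String :=
  pvMessage pvTable (PySem.Dict.getD (PySem.Dict.mk x) "name" "")

-- One loop iteration appends the page break (exactly when i % 3 = 0 and i ≠ 0) and then the message.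
theorem pvStep_eval (t : String) (x : List (String × String)) (s : Int) (h0 : 0 ≤ s) :
    pvStepP t (s, x) = t ++ (if s % 3 = 0 ∧ s ≠ 0 then "\x0C" else "") ++ pvMsgOf x := by
  have hm : PySem.Int.mod s 3 = s % 3 := by simp [PySem.Int.mod, Int.fmod_eq_emod_of_nonneg]
  unfold pvStepP pvMsgOf
  simp only [pvChain_eq_message, hm]
  by_cases h3 : (3 : Int) ≤ s
  · by_cases hd : s % 3 = 0
    · simp [show ¬ s ≤ 2 by omega, h3, hd, show s ≠ 0 by omega, String.append_assoc]
    · simp [show ¬ s ≤ 2 by omega, h3, hd]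
  · have hc : ¬ ((3 : Int) ∣ s ∧ ¬ s = 0) := by omega
    have hb : (s % 3 == 0 && !(s == 0)) = false := by
      rcases (by omega : s = 0 ∨ s = 1 ∨ s = 2) with h | h | h <;> simp [h]
    simp [show s ≤ 2 by omega, h3, hc, hb]

-- A's loop over a suffix starting at a chunk boundary s (s % 3 = 0) appends exactly a
-- leading page break (when s ≠ 0 and the suffix is nonempty) followed by the suffix's pages.
theorem pvPagesAux (N : Nat) : ∀ (ms : List (List (String × String))) (s : Int) (T : String),
    ms.length ≤ N → 0 ≤ s → s % 3 = 0 →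
    (PySem.List.enumerate ms s).foldl pvStepP T
      = T ++ (if s ≠ 0 ∧ ms ≠ [] then "\x0C" else "") ++ pvPagesText (ms.map pvMsgOf) := by
  induction N with
  | zero =>
    intro ms s T hlen h0 h3
    have : ms = [] := List.length_eq_zero_iff.mp (Nat.le_zero.mp hlen)
    subst this
    simp [PySem.List.enumerate_nil, pvPagesText]
  | succ N ih =>
    intro ms s T hlen h0 h3
    have hsep : (if s % 3 = 0 ∧ s ≠ 0 then ("\x0C" : String) else "") = (if s ≠ 0 then "\x0C" else "") := by
      by_cases hs : s = 0 <;> simp [hs, h3]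
    match ms with
    | [] => simp [PySem.List.enumerate_nil, pvPagesText]
    | [a] =>
      simp only [PySem.List.enumerate_cons, PySem.List.enumerate_nil, List.foldl_cons,
        List.foldl_nil, List.map_cons, List.map_nil]
      rw [pvStep_eval _ _ _ h0, hsep]
      (by_cases hs : s = 0 <;> simp [hs, pvPagesText, String.append_assoc])
    | [a, b] =>
      simp only [PySem.List.enumerate_cons, PySem.List.enumerate_nil, List.foldl_cons,
        List.foldl_nil, List.map_cons, List.map_nil]
      rw [pvStep_eval _ _ _ h0, pvStep_eval _ _ _ (by omega), hsep]
      have h1 : ¬ ((3 : Int) ∣ (s + 1) ∧ ¬ s + 1 = 0) := by omega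
      (by_cases hs : s = 0 <;> simp [hs, h1, pvPagesText, String.append_assoc])
    | a :: b :: c :: rest =>
      simp only [PySem.List.enumerate_cons, List.foldl_cons, List.map_cons]
      rw [pvStep_eval _ _ _ h0, pvStep_eval _ _ _ (by omega), pvStep_eval _ _ _ (by omega), hsep]
      have h1 : ¬ ((3 : Int) ∣ (s + 1) ∧ ¬ s + 1 = 0) := by omega
      have h2 : ¬ ((3 : Int) ∣ (s + 1 + 1) ∧ ¬ s + 1 + 1 = 0) := by omega
      have hlen' : rest.length ≤ N := by simp at hlen; omega
      rw [ih rest (s + 1 + 1 + 1) _ hlen' (by omega) (by omega)]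
      have h4 : ¬ (s + 1 + 1 + 1 = 0) := by omega
      match rest with
      | [] => (by_cases hs : s = 0 <;> simp [hs, h1, h2, h4, pvPagesText, String.append_assoc])
      | d :: rest' => (by_cases hs : s = 0 <;> simp [hs, h1, h2, h4, pvPagesText, String.append_assoc])

-- Proof-only helpers naming the two header strings (definitionally the ones in the ports).
def pvHeaderA (villageName : String) (structuresNumber : Int) (structuresNames : List (List (String × String))) (deadVillagersNumber : Int) (listOfVillagers : List String) : String :=
  ("\\\\s--------------\\\\n" ++ "                      \\\\n" ++ "                      \\\\n" ++
   "   Welcome to      \\\\n" ++ " " ++ villageName ++ " \\\\n" ++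
   "                      \\\\n" ++ "                      \\\\n" ++ "                      \\\\n" ++
   "                      \\\\n" ++ "                      \\\\n" ++ "                      \\\\n" ++
   "                      \\\\n" ++ "--------------" ++
   "\x0C\\\\s---------------\\\\n" ++
   PySem.Int.toStr (PySem.List.len listOfVillagers) ++ " villagers arrived in " ++
   PySem.Int.toStr ((PySem.List.pyRange 0 (PySem.List.len structuresNames)).foldl
     (fun n i => if PySem.Str.isIn "house" (PySem.Dict.getD (PySem.Dict.mk (PySem.List.pyGetD structuresNames i [])) "name" "") then n + 1 else n) (0 : Int)) ++
   " houses \\\\n" ++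
   PySem.Int.toStr deadVillagersNumber ++ " villagers have died since their arrival. \\\\n" ++
   "There are " ++ PySem.Int.toStr structuresNumber ++ " structures. \\\\n" ++
   "---------------\\\\n\x0C")

def pvHeaderB (villageName : String) (structuresNumber : Int) (structuresNames : List (List (String × String))) (deadVillagersNumber : Int) (listOfVillagers : List String) : String :=
  ("\\\\s--------------\\\\n" ++ "                      \\\\n" ++ "                      \\\\n" ++
   "   Welcome to      \\\\n" ++ " " ++ villageName ++ " \\\\n" ++
   "                      \\\\n" ++ "                      \\\\n" ++ "                      \\\\n" ++
   "                      \\\\n" ++ "                      \\\\n" ++ "                      \\\\n" ++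
   "                      \\\\n" ++ "--------------" ++
   "\x0C\\\\s---------------\\\\n" ++
   PySem.Int.toStr (PySem.List.len listOfVillagers) ++ " villagers arrived in " ++
   PySem.Int.toStr (PySem.List.len (structuresNames.filter (fun s => PySem.Str.isIn "house" (PySem.Dict.getD (PySem.Dict.mk s) "name" "")))) ++
   " houses \\\\n" ++
   PySem.Int.toStr deadVillagersNumber ++ " villagers have died since their arrival. \\\\n" ++
   "There are " ++ PySem.Int.toStr structuresNumber ++ " structures. \\\\n" ++
   "---------------\\\\n\x0C")

theorem pvHeader_eq (villageName : String) (structuresNumber : Int) (structuresNames : List (List (String × String))) (deadVillagersNumber : Int) (listOfVillagers : List String) :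
    pvHeaderA villageName structuresNumber structuresNames deadVillagersNumber listOfVillagers
      = pvHeaderB villageName structuresNumber structuresNames deadVillagersNumber listOfVillagers := by
  unfold pvHeaderA pvHeaderB
  rw [pvCount_eq]

theorem pvBridge (l : List (List (String × String))) (init : String) :
    (PySem.List.pyRange 0 (PySem.List.len l)).foldl
        (fun t i => pvStepP t (i, PySem.List.pyGetD l i [])) init
      = (PySem.List.enumerate l 0).foldl pvStepP init := by
  rw [PySem.List.enumerate_eq_map_pyRange l ([] : List (String × String)), List.foldl_map]

-- ===== VERDICT (by name: the statement is the Claim_ definition above) =====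
theorem createTextOfPresentationVillage_spec : Claim_equal_createTextOfPresentationVillage := by
  intro villageName structuresNumber structuresNames deadVillagersNumber listOfVillagers _hDom _hPre
  unfold Spec_createTextOfPresentationVillage
  show (PySem.List.pyRange 0 (PySem.List.len structuresNames)).foldl
      (fun t i => pvStepP t (i, PySem.List.pyGetD structuresNames i []))
      (pvHeaderA villageName structuresNumber structuresNames deadVillagersNumber listOfVillagers)
    = pvHeaderB villageName structuresNumber structuresNames deadVillagersNumber listOfVillagers
        ++ pvPagesText (structuresNames.map pvMsgOf)
  rw [pvBridge, pvPagesAux structuresNames.length structuresNames 0 _ le_rfl le_rfl (by omega),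
    pvHeader_eq]
  simp
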